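-- pv_equiv track=rewrite | github.com/emergent-company/emergent.memory | tools/graph-import/fix_missing_wiring.py | get_actor_for_key
-- ===== SOURCE A (Python) =====
-- ACTOR_DEVELOPER_ID = "cd5813df-f89d-4bb6-8d1d-c782bc16929e"
--
-- ACTOR_SYSTEM_ID = "b65c5bfe-23df-4d29-b4e9-374e7b4e00ae"
--
-- def get_actor_for_key(key: str) -> str:
--     system_keywords = ["push", "event", "background", "system", "auto", "trigger", "schedule",
--                        "webhook", "notify", "emit", "broadcast", "process", "index", "embed",
--                        "extract", "chunk", "discover", "sync", "monitor", "health"]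
--     for kw in system_keywords:
--         if kw in key:
--             return ACTOR_SYSTEM_ID
--     return ACTOR_DEVELOPER_ID
-- ===== SOURCE B (Python) =====
-- ACTOR_DEVELOPER_ID = "cd5813df-f89d-4bb6-8d1d-c782bc16929e"
--
-- ACTOR_SYSTEM_ID = "b65c5bfe-23df-4d29-b4e9-374e7b4e00ae"
--
-- _SYSTEM_KEYWORDS = ("push", "event", "background", "system", "auto", "trigger", "schedule",
--                     "webhook", "notify", "emit", "broadcast", "process", "index", "embed",
--                     "extract", "chunk", "discover", "sync", "monitor", "health")
--
-- def get_actor_for_key(key: str) -> str: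
--     # one left-to-right scan over positions of the key; at each position ask
--     # whether any keyword begins there
--     if any(key.startswith(_SYSTEM_KEYWORDS, i) for i in range(len(key))):
--         return ACTOR_SYSTEM_ID
--     return ACTOR_DEVELOPER_ID
-- ===== Notes on version B (the rewrite author's own statement) =====
-- stated objective: alternative
-- what changed: Replaced the per-keyword substring loop with a single left-to-right scan over positions of the key, testing at each position whether any keyword starts there via str.startswith with a keyword tuple.
import Mathlib
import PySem

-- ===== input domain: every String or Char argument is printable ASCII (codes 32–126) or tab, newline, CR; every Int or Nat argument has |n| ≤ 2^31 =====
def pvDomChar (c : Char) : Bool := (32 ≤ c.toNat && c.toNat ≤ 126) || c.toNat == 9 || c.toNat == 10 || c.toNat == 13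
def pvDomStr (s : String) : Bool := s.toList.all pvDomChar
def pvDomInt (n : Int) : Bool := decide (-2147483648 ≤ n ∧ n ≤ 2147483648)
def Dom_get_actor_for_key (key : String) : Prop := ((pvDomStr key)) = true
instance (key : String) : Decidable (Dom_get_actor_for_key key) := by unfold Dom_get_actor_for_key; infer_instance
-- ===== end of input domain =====

-- B scans the key by position (any keyword starting at some index) instead of A's
-- per-keyword substring loop; alternative structure, same cost.

def ACTOR_DEVELOPER_ID : String := "cd5813df-f89d-4bb6-8d1d-c782bc16929e"

def ACTOR_SYSTEM_ID : String := "b65c5bfe-23df-4d29-b4e9-374e7b4e00ae"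

def systemKeywords : List String :=
  ["push", "event", "background", "system", "auto", "trigger", "schedule",
   "webhook", "notify", "emit", "broadcast", "process", "index", "embed",
   "extract", "chunk", "discover", "sync", "monitor", "health"]

-- ===== PORT A =====
-- 'for kw in system_keywords: if kw in key: return SYSTEM' then 'return DEVELOPER'
def aLoop (kws : List String) (key : String) : String :=
  match kws with
  | [] => ACTOR_DEVELOPER_ID
  | kw :: rest => if PySem.Str.isIn kw key then ACTOR_SYSTEM_ID else aLoop rest key

def get_actor_for_key (key : String) : String :=
  aLoop systemKeywords key

-- ===== PORT B =====
-- 'any(key.startswith(KEYWORDS, i) for i in range(len(key)))': scan the suffixes of key,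
-- at each position test whether some keyword starts there
def bScan (cs : List Char) : Bool :=
  match cs with
  | [] => false
  | _ :: tail =>
      (systemKeywords.any (fun kw => PySem.Chars.startswith cs kw.toList)) || bScan tail

def get_actor_for_key_alt (key : String) : String :=
  if bScan key.toList then ACTOR_SYSTEM_ID else ACTOR_DEVELOPER_ID

-- ===== PRECONDITION & SPEC =====
def Spec_get_actor_for_key (key : String) (out : String) : Prop := out = get_actor_for_key_alt key
instance (key : String) (out : String) : Decidable (Spec_get_actor_for_key key out) := by unfold Spec_get_actor_for_key; infer_instance

-- ===== CLAIM (what is proved, stated in full; the proofs are below) =====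
def Claim_equal_get_actor_for_key : Prop := ∀ (key : String), Dom_get_actor_for_key key → Spec_get_actor_for_key key (get_actor_for_key key)

-- ===== LEMMAS AND PROOFS =====

-- A's first-match loop collapses to 'some keyword is in key' (both returns are the same constant)
theorem aLoop_eq (kws : List String) (key : String) :
    aLoop kws key =
      if kws.any (fun kw => PySem.Chars.isIn kw.toList key.toList) then ACTOR_SYSTEM_ID else ACTOR_DEVELOPER_ID := by
  induction kws with
  | nil => simp [aLoop]
  | cons kw rest ih =>
      by_cases h : PySem.Chars.isIn kw.toList key.toList = true <;> simp [aLoop, h, ih]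

-- every keyword is nonempty
theorem keywords_ne_nil : ∀ kw ∈ systemKeywords, kw.toList ≠ [] := by decide

-- B's position scan finds exactly 'some keyword is a prefix of some suffix'
theorem bScan_iff (cs : List Char) :
    bScan cs = true ↔ ∃ kw ∈ systemKeywords, ∃ j, kw.toList <+: cs.drop j := by
  induction cs with
  | nil =>
      simp only [bScan, List.drop_nil]
      constructor
      · intro h; cases h
      · rintro ⟨kw, hkw, j, hpre⟩
        exact absurd (List.prefix_nil.mp hpre) (keywords_ne_nil kw hkw)
  | cons c tail ih =>
      simp only [bScan, Bool.or_eq_true, List.any_eq_true, PySem.Chars.startswith_iff, ih]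
      constructor
      · rintro (⟨kw, hkw, hpre⟩ | ⟨kw, hkw, j, hpre⟩)
        · exact ⟨kw, hkw, 0, by simpa using hpre⟩
        · exact ⟨kw, hkw, j + 1, by simpa using hpre⟩
      · rintro ⟨kw, hkw, j, hpre⟩
        cases j with
        | zero => exact Or.inl ⟨kw, hkw, by simpa using hpre⟩
        | succ j => exact Or.inr ⟨kw, hkw, j, by simpa using hpre⟩

theorem bScan_eq_any (key : String) :
    bScan key.toList = systemKeywords.any (fun kw => PySem.Chars.isIn kw.toList key.toList) := by
  rcases h : systemKeywords.any (fun kw => PySem.Chars.isIn kw.toList key.toList) with _ | _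
  · rw [Bool.eq_false_iff]
    intro hb
    rcases (bScan_iff key.toList).mp hb with ⟨kw, hkw, j, hpre⟩
    have hin : PySem.Chars.isIn kw.toList key.toList = true :=
      (PySem.Chars.exists_prefix_drop_iff_isIn _ _).mp ⟨j, hpre⟩
    have : systemKeywords.any (fun kw => PySem.Chars.isIn kw.toList key.toList) = true :=
      List.any_eq_true.mpr ⟨kw, hkw, hin⟩
    simp [this] at h
  · rcases List.any_eq_true.mp h with ⟨kw, hkw, hin⟩
    have : ∃ j, kw.toList <+: key.toList.drop j := by
      exact (PySem.Chars.exists_prefix_drop_iff_isIn _ _).mpr hin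
    rcases this with ⟨j, hpre⟩
    exact (bScan_iff key.toList).mpr ⟨kw, hkw, j, hpre⟩

-- ===== VERDICT (by name: the statement is the Claim_ definition above) =====
theorem get_actor_for_key_spec : Claim_equal_get_actor_for_key := by
  intro key _
  unfold Spec_get_actor_for_key get_actor_for_key get_actor_for_key_alt
  rw [aLoop_eq, bScan_eq_any]
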